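-- pv_equiv track=rewrite | github.com/john0818-stu/python | 簡明python學習講義/9/4.py | rotaing_mat
-- ===== SOURCE A (Python) =====
-- def rotaing_mat(n) :
--
--     ans = [[0 for i in range(n)] for j in range(n) ]
--
--     r , c , d = 0 , 0 , 0
--
--     dr , dc = [0,1,0,-1] , [1,0,-1,0]
--
--     for i in range( 1 , n**2+1 ) :
--
--         ans[r][c] = i
--
--         if ( r - c == 1 and r <= n//2 ) or ( r + c == n-1 ) or ( r == c and r >= n//2 ) :
--
--             d = d + 1
--
--         r += dr[d%4]
--
--         c += dc[d%4]
--
--     return "\n" + "\n".join( [ "  ".join( [ "{:>2}".format( str(y) ) for y in x ] )  for x in ans ] )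
-- ===== SOURCE B (Python) =====
-- def rotaing_mat(n):
--     ans = [[0] * n for _ in range(n)]
--     top, bottom, left, right = 0, n - 1, 0, n - 1
--     val = 1
--     while top <= bottom and left <= right:
--         for c in range(left, right + 1):
--             ans[top][c] = val
--             val += 1
--         for r in range(top + 1, bottom + 1):
--             ans[r][right] = val
--             val += 1
--         if top < bottom:
--             for c in range(right - 1, left - 1, -1):
--                 ans[bottom][c] = val
--                 val += 1
--         if left < right:
--             for r in range(bottom - 1, top, -1):
--                 ans[r][left] = val
--                 val += 1
--         top += 1
--         bottom -= 1
--         left += 1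
--         right -= 1
--     return "\n" + "\n".join(["  ".join(["{:>2}".format(str(y)) for y in x]) for x in ans])
-- ===== Notes on version B (the rewrite author's own statement) =====
-- stated objective: alternative
-- what changed: Replaced the single walker with direction indices and an arithmetic turn predicate by the classic four-bounds layer filling (top/bottom/left/right shrink each pass); identical grid and final formatting.
import Mathlib
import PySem

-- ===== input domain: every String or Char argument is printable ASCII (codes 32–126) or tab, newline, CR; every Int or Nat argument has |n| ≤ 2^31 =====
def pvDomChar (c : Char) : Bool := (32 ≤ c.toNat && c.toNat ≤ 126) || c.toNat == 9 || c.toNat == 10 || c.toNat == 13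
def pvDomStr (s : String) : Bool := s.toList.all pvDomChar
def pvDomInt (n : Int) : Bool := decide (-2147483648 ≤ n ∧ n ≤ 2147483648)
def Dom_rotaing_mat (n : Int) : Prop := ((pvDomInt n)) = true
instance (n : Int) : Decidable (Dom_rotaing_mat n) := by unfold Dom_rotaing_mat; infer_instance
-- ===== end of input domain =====

-- B replaces A's single walker (direction indices + arithmetic turn predicate) by the classic
-- four-bounds layer filling; same grid, same formatting. Equivalence of the RETURN value on n ≥ 0.

-- ===== shared helpers (identical source text in both Pythons: `ans[r][c] = v` and the final format line) =====
-- Python `ans[r][c] = v` (in-range under Pre_; pyGetD/pySetD defaults are never reached there)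
def setCell (g : List (List Int)) (r c v : Int) : List (List Int) :=
  PySem.List.pySetD g r (PySem.List.pySetD (PySem.List.pyGetD g r []) c v)

-- '{:>2}'.format(str(y)) : right-align str(y) to width 2 with spaces (exact)
def fmtCell (y : Int) : List Char :=
  List.replicate (2 - (PySem.Int.toChars y).length) ' ' ++ PySem.Int.toChars y

-- '\n' + '\n'.join('  '.join(fmtCell(y) for y in x) for x in ans)
def fmtMat (m : List (List Int)) : String :=
  String.ofList ('\n' :: PySem.Chars.join ['\n'] (m.map (fun x => PySem.Chars.join [' ', ' '] (x.map fmtCell))))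

-- ===== PORT A =====
-- dr[d%4] / dc[d%4] lookups
def dirR (d : Int) : Int := PySem.List.pyGetD [0, 1, 0, -1] (PySem.Int.mod d 4) 0
def dirC (d : Int) : Int := PySem.List.pyGetD [1, 0, -1, 0] (PySem.Int.mod d 4) 0

-- the loop body of A: write i at (r,c), maybe turn, then move
def stepA (n : Int) (st : List (List Int) × Int × Int × Int) (i : Int) :
    List (List Int) × Int × Int × Int :=
  let (g, r, c, d) := st
  let g' := setCell g r c i
  let d' := if (r - c = 1 ∧ r ≤ PySem.Int.floordiv n 2) ∨ (r + c = n - 1) ∨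
               (r = c ∧ PySem.Int.floordiv n 2 ≤ r) then d + 1 else d
  (g', r + dirR d', c + dirC d', d')

def rotaing_mat (n : Int) : String :=
  let ans := (PySem.List.pyRange 0 n 1).map (fun _ => (PySem.List.pyRange 0 n 1).map (fun _ => (0 : Int)))
  let st := (PySem.List.pyRange 1 (n ^ 2 + 1) 1).foldl (stepA n) (ans, 0, 0, 0)
  fmtMat st.1

-- ===== PORT B =====
-- the while loop: fill top row, right column, (guarded) bottom row, (guarded) left column, shrink
def spiralLoop (fuel : Nat) (n : Int) (g : List (List Int)) (top bottom left right val : Int) :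
    List (List Int) :=
  match fuel with
  | 0 => g
  | fuel + 1 =>
  if top ≤ bottom ∧ left ≤ right then
    let st1 := (PySem.List.pyRange left (right + 1) 1).foldl
      (fun st c => (setCell st.1 top c st.2, st.2 + 1)) (g, val)
    let st2 := (PySem.List.pyRange (top + 1) (bottom + 1) 1).foldl
      (fun st r => (setCell st.1 r right st.2, st.2 + 1)) st1
    let st3 := if top < bottom then
        (PySem.List.pyRange (right - 1) (left - 1) (-1)).foldl
          (fun st c => (setCell st.1 bottom c st.2, st.2 + 1)) st2
      else st2
    let st4 := if left < right then
        (PySem.List.pyRange (bottom - 1) top (-1)).foldl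
          (fun st r => (setCell st.1 r left st.2, st.2 + 1)) st3
      else st3
    spiralLoop fuel n st4.1 (top + 1) (bottom - 1) (left + 1) (right - 1) st4.2
  else g

def rotaing_mat_alt (n : Int) : String :=
  let ans := (PySem.List.pyRange 0 n 1).map (fun _ => PySem.List.pyRepeat [(0 : Int)] n)
  fmtMat (spiralLoop (n - 1 + 1 - 0).toNat n ans 0 (n - 1) 0 (n - 1) 1)

-- ===== PRECONDITION & SPEC =====
-- A raises IndexError for every n < 0 (it indexes row 0 of an empty list); Pre_ is exactly where A returns.
def Pre_rotaing_mat (n : Int) : Prop := 0 ≤ n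
instance (n : Int) : Decidable (Pre_rotaing_mat n) := by unfold Pre_rotaing_mat; infer_instance
def pvWitness_rotaing_mat : Int := (3)

def Spec_rotaing_mat (n : Int) (out : String) : Prop := out = rotaing_mat_alt n
instance (n : Int) (out : String) : Decidable (Spec_rotaing_mat n out) := by unfold Spec_rotaing_mat; infer_instance

-- ===== CLAIM (what is proved, stated in full; the proofs are below) =====
def Claim_equal_rotaing_mat : Prop := ∀ (n : Int), Dom_rotaing_mat n → Pre_rotaing_mat n → Spec_rotaing_mat n (rotaing_mat n)
-- ===== LEMMAS AND PROOFS =====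

-- a list of (row, col, value) writes applied in order
def applyWrites (g : List (List Int)) (ws : List (Int × Int × Int)) : List (List Int) :=
  ws.foldl (fun g w => setCell g w.1 w.2.1 w.2.2) g

-- writes of a straight run: start (r0,c0), direction (a,b), first value v0, length m
def segW (r0 c0 a b v0 : Int) : Nat → List (Int × Int × Int)
  | 0 => []
  | m + 1 => (r0, c0, v0) :: segW (r0 + a) (c0 + b) a b (v0 + 1) m

-- writes of one of B's for-loops: cells f x for x in xs, consecutive values from v0
def writesOf (xs : List Int) (f : Int → Int × Int) (v0 : Int) : List (Int × Int × Int) :=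
  match xs with
  | [] => []
  | x :: t => ((f x).1, (f x).2, v0) :: writesOf t f (v0 + 1)

-- A's turn predicate
def turnP (n r c : Int) : Prop :=
  (r - c = 1 ∧ r ≤ PySem.Int.floordiv n 2) ∨ (r + c = n - 1) ∨
    (r = c ∧ PySem.Int.floordiv n 2 ≤ r)

theorem dirR_val (d : Int) :
    dirR d = if d % 4 = 0 then 0 else if d % 4 = 1 then 1 else if d % 4 = 2 then 0 else -1 := by
  unfold dirR
  rw [PySem.Int.mod_eq_emod_of_pos (by norm_num)]
  have h : d % 4 = 0 ∨ d % 4 = 1 ∨ d % 4 = 2 ∨ d % 4 = 3 := by omega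
  rcases h with h | h | h | h <;> simp [h, PySem.List.pyGetD, PySem.List.pyGet?, PySem.List.pyIdx?]

theorem dirC_val (d : Int) :
    dirC d = if d % 4 = 0 then 1 else if d % 4 = 1 then 0 else if d % 4 = 2 then -1 else 0 := by
  unfold dirC
  rw [PySem.Int.mod_eq_emod_of_pos (by norm_num)]
  have h : d % 4 = 0 ∨ d % 4 = 1 ∨ d % 4 = 2 ∨ d % 4 = 3 := by omega
  rcases h with h | h | h | h <;> simp [h, PySem.List.pyGetD, PySem.List.pyGet?, PySem.List.pyIdx?]

-- one straight run of A's walker: no turn before the last cell, turn at the last cell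
theorem runA (n : Int) : ∀ (m : Nat), 1 ≤ m →
    ∀ (g : List (List Int)) (r0 c0 d v0 : Int),
      (∀ k : Nat, k + 1 < m → ¬ turnP n (r0 + dirR d * k) (c0 + dirC d * k)) →
      turnP n (r0 + dirR d * (m - 1 : Nat)) (c0 + dirC d * (m - 1 : Nat)) →
      (PySem.List.pyRange v0 (v0 + m) 1).foldl (stepA n) (g, r0, c0, d) =
        (applyWrites g (segW r0 c0 (dirR d) (dirC d) v0 m),
          r0 + dirR d * (m - 1 : Nat) + dirR (d + 1),
          c0 + dirC d * (m - 1 : Nat) + dirC (d + 1), d + 1) := by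
  intro m
  induction m with
  | zero => omega
  | succ k ih =>
    intro _ g r0 c0 d v0 hno ht
    rw [PySem.List.pyRange_one_cons (by push_cast; omega)]
    simp only [List.foldl_cons]
    match k, ih with
    | 0, _ =>
      simp only [Nat.add_sub_cancel, Nat.cast_zero, mul_zero, add_zero] at ht
      have ht' := ht; unfold turnP at ht'
      simp only [stepA]
      rw [if_pos ht']
      have he : v0 + ((1:Nat):Int) = v0 + 1 := by push_cast; ring
      rw [he, PySem.List.pyRange_one_eq_nil (by omega)]
      simp [applyWrites, segW]
    | j + 1, ih =>
      have hno0 := hno 0 (by omega)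
      simp only [Nat.cast_zero, mul_zero, add_zero] at hno0
      unfold turnP at hno0
      simp only [stepA]
      rw [if_neg hno0]
      have he : v0 + ((j + 2 : Nat) : Int) = (v0 + 1) + ((j + 1 : Nat) : Int) := by push_cast; ring
      rw [he]
      rw [ih (by omega) (setCell g r0 c0 v0) (r0 + dirR d) (c0 + dirC d) d (v0 + 1)
        (by intro k' hk'
            have h := hno (k' + 1) (by omega)
            rw [show r0 + dirR d + dirR d * (k' : Int) = r0 + dirR d * ((k' + 1 : Nat) : Int) by push_cast; ring,
                show c0 + dirC d + dirC d * (k' : Int) = c0 + dirC d * ((k' + 1 : Nat) : Int) by push_cast; ring]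
            exact h)
        (by have h := ht
            simp only [Nat.add_sub_cancel] at h ⊢
            rw [show r0 + dirR d + dirR d * (j : Int) = r0 + dirR d * ((j + 1 : Nat) : Int) by push_cast; ring,
                show c0 + dirC d + dirC d * (j : Int) = c0 + dirC d * ((j + 1 : Nat) : Int) by push_cast; ring]
            exact h)]
      simp only [Nat.add_sub_cancel]
      rw [show segW r0 c0 (dirR d) (dirC d) v0 (j + 1 + 1) =
            (r0, c0, v0) :: segW (r0 + dirR d) (c0 + dirC d) (dirR d) (dirC d) (v0 + 1) (j + 1) from rfl]
      simp only [applyWrites, List.foldl_cons]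
      rw [show r0 + dirR d * ((j + 1 : Nat) : Int) = r0 + dirR d + dirR d * (j : Int) by push_cast; ring,
          show c0 + dirC d * ((j + 1 : Nat) : Int) = c0 + dirC d + dirC d * (j : Int) by push_cast; ring]

-- B's loops produce writesOf
theorem foldB (xs : List Int) (f : Int → Int × Int) :
    ∀ (g : List (List Int)) (v0 : Int),
      xs.foldl (fun st c => (setCell st.1 (f c).1 (f c).2 st.2, st.2 + 1)) (g, v0) =
        (applyWrites g (writesOf xs f v0), v0 + xs.length) := by
  induction xs with
  | nil => intro g v0; simp [writesOf, applyWrites]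
  | cons x t ih =>
      intro g v0
      simp only [List.foldl_cons, writesOf, applyWrites, List.length_cons]
      rw [ih]
      simp [applyWrites]
      omega

theorem wRowF (row : Int) (m : Nat) : ∀ (c0 v0 : Int),
    writesOf (PySem.List.pyRange c0 (c0 + m) 1) (fun c => (row, c)) v0 = segW row c0 0 1 v0 m := by
  induction m with
  | zero => intro c0 v0; simp [PySem.List.pyRange_one_eq_nil, writesOf, segW]
  | succ k ih =>
      intro c0 v0
      rw [PySem.List.pyRange_one_cons (by push_cast; omega)]
      have h2 : c0 + ((k + 1 : Nat) : Int) = (c0 + 1) + (k : Int) := by push_cast; ring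
      rw [h2, segW, writesOf, ih]
      norm_num

theorem wColF (col : Int) (m : Nat) : ∀ (r0 v0 : Int),
    writesOf (PySem.List.pyRange r0 (r0 + m) 1) (fun r => (r, col)) v0 = segW r0 col 1 0 v0 m := by
  induction m with
  | zero => intro r0 v0; simp [PySem.List.pyRange_one_eq_nil, writesOf, segW]
  | succ k ih =>
      intro r0 v0
      rw [PySem.List.pyRange_one_cons (by push_cast; omega)]
      have h2 : r0 + ((k + 1 : Nat) : Int) = (r0 + 1) + (k : Int) := by push_cast; ring
      rw [h2, segW, writesOf, ih]
      norm_num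

theorem wRowB (row : Int) (m : Nat) : ∀ (c0 v0 : Int),
    writesOf (PySem.List.pyRange c0 (c0 - m) (-1)) (fun c => (row, c)) v0 = segW row c0 0 (-1) v0 m := by
  induction m with
  | zero => intro c0 v0; simp [PySem.List.pyRange_neg_one_eq_nil, writesOf, segW]
  | succ k ih =>
      intro c0 v0
      rw [PySem.List.pyRange_neg_one_cons (by push_cast; omega)]
      have h2 : c0 - ((k + 1 : Nat) : Int) = (c0 - 1) - (k : Int) := by push_cast; ring
      rw [h2, segW, writesOf, ih]
      norm_num
      rw [show c0 + -1 = c0 - 1 by ring]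

theorem wColB (col : Int) (m : Nat) : ∀ (r0 v0 : Int),
    writesOf (PySem.List.pyRange r0 (r0 - m) (-1)) (fun r => (r, col)) v0 = segW r0 col (-1) 0 v0 m := by
  induction m with
  | zero => intro r0 v0; simp [PySem.List.pyRange_neg_one_eq_nil, writesOf, segW]
  | succ k ih =>
      intro r0 v0
      rw [PySem.List.pyRange_neg_one_cons (by push_cast; omega)]
      have h2 : r0 - ((k + 1 : Nat) : Int) = (r0 - 1) - (k : Int) := by push_cast; ring
      rw [h2, segW, writesOf, ih]
      norm_num
      rw [show r0 + -1 = r0 - 1 by ring]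

-- endpoint-form wrappers and the master coupling
theorem foldBRow (xs : List Int) (row : Int) (g : List (List Int)) (v0 : Int) :
    xs.foldl (fun st c => (setCell st.1 row c st.2, st.2 + 1)) (g, v0) =
      (applyWrites g (writesOf xs (fun c => (row, c)) v0), v0 + xs.length) :=
  foldB xs (fun c => (row, c)) g v0

theorem foldBCol (xs : List Int) (col : Int) (g : List (List Int)) (v0 : Int) :
    xs.foldl (fun st r => (setCell st.1 r col st.2, st.2 + 1)) (g, v0) =
      (applyWrites g (writesOf xs (fun r => (r, col)) v0), v0 + xs.length) :=
  foldB xs (fun r => (r, col)) g v0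

theorem runA' (n a b : Int) (h : a < b) (g : List (List Int)) (r0 c0 d : Int)
    (hno : ∀ k : Nat, k + 1 < (b - a).toNat → ¬ turnP n (r0 + dirR d * k) (c0 + dirC d * k))
    (ht : turnP n (r0 + dirR d * ((b - a).toNat - 1 : Nat)) (c0 + dirC d * ((b - a).toNat - 1 : Nat))) :
    (PySem.List.pyRange a b 1).foldl (stepA n) (g, r0, c0, d) =
      (applyWrites g (segW r0 c0 (dirR d) (dirC d) a (b - a).toNat),
        r0 + dirR d * ((b - a).toNat - 1 : Nat) + dirR (d + 1),
        c0 + dirC d * ((b - a).toNat - 1 : Nat) + dirC (d + 1), d + 1) := by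
  have h1 : 1 ≤ (b - a).toNat := by omega
  have h2 : a + ((b - a).toNat : Int) = b := by omega
  have := runA n (b - a).toNat h1 g r0 c0 d a hno ht
  rw [h2] at this
  exact this

theorem wRowF' (row a b v0 : Int) (h : a ≤ b) :
    writesOf (PySem.List.pyRange a b 1) (fun c => (row, c)) v0 = segW row a 0 1 v0 (b - a).toNat := by
  have h2 : a + ((b - a).toNat : Int) = b := by omega
  have := wRowF row (b - a).toNat a v0
  rw [h2] at this
  exact this

theorem wColF' (col a b v0 : Int) (h : a ≤ b) :
    writesOf (PySem.List.pyRange a b 1) (fun r => (r, col)) v0 = segW a col 1 0 v0 (b - a).toNat := by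
  have h2 : a + ((b - a).toNat : Int) = b := by omega
  have := wColF col (b - a).toNat a v0
  rw [h2] at this
  exact this

theorem wRowB' (row a b v0 : Int) (h : b ≤ a) :
    writesOf (PySem.List.pyRange a b (-1)) (fun c => (row, c)) v0 = segW row a 0 (-1) v0 (a - b).toNat := by
  have h2 : a - ((a - b).toNat : Int) = b := by omega
  have := wRowB row (a - b).toNat a v0
  rw [h2] at this
  exact this

theorem wColB' (col a b v0 : Int) (h : b ≤ a) :
    writesOf (PySem.List.pyRange a b (-1)) (fun r => (r, col)) v0 = segW a col (-1) 0 v0 (a - b).toNat := by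
  have h2 : a - ((a - b).toNat : Int) = b := by omega
  have := wColB col (a - b).toNat a v0
  rw [h2] at this
  exact this

theorem masterGen (n : Int) (_hn : 0 ≤ n) (t : Nat) :
    ∀ (fuel : Nat) (l d v0 : Int) (g : List (List Int)), 0 ≤ l → 2 * l ≤ n →
      (n - 2 * l).toNat = t → (n - 2 * l).toNat ≤ fuel → d % 4 = 0 →
      v0 = n ^ 2 - (n - 2 * l) ^ 2 + 1 →
      ((PySem.List.pyRange v0 (n ^ 2 + 1) 1).foldl (stepA n) (g, l, l, d)).1 =
        spiralLoop fuel n g l (n - 1 - l) l (n - 1 - l) v0 := by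
  induction t using Nat.strong_induction_on with
  | _ t ih =>
  intro fuel l d v0 g hl h2l ht hfuel hd hv
  have hq1 : PySem.Int.floordiv n 2 * 2 + PySem.Int.mod n 2 = n := PySem.Int.floordiv_mul_add_mod n 2
  have hq2 : 0 ≤ PySem.Int.mod n 2 := PySem.Int.mod_nonneg n (by norm_num)
  have hq3 : PySem.Int.mod n 2 < 2 := PySem.Int.mod_lt n (by norm_num)
  by_cases hA : n = 2 * l
  · -- no ring left: the range is empty and the loop guard fails
    have hv' : v0 = n ^ 2 + 1 := by rw [hv, hA]; ring
    rw [hv', PySem.List.pyRange_one_eq_nil (by omega)]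
    cases fuel with
    | zero => simp [spiralLoop]
    | succ f => simp only [spiralLoop]; rw [if_neg (by omega)]; simp
  · by_cases hB : n = 2 * l + 1
    · -- single centre cell
      have hv' : v0 = n ^ 2 := by rw [hv, show n - 2 * l = 1 by omega]; ring
      obtain ⟨f, rfl⟩ : ∃ f, fuel = f + 1 := ⟨fuel - 1, by omega⟩
      have hb : n - 1 - l = l := by omega
      rw [hb, show n ^ 2 + 1 = v0 + 1 by omega, PySem.List.pyRange_one_singleton]
      simp only [List.foldl_cons, List.foldl_nil, stepA]
      simp only [spiralLoop]
      rw [if_pos ⟨le_refl l, le_refl l⟩]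
      rw [PySem.List.pyRange_one_singleton, PySem.List.pyRange_one_eq_nil (by omega)]
      simp only [List.foldl_cons, List.foldl_nil, if_neg (lt_irrefl l)]
      cases f with
      | zero => simp [spiralLoop]
      | succ f' => simp only [spiralLoop]; rw [if_neg (by omega)]
    · by_cases hC : n = 2 * l + 2
      · -- terminal 2×2 ring
        have hv2 : v0 = n ^ 2 - 3 := by rw [hv, show n - 2 * l = 2 by omega]; ring
        obtain ⟨f, rfl⟩ : ∃ f, fuel = f + 1 := ⟨fuel - 1, by omega⟩
        have e1 : (d + 1) % 4 = 1 := by omega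
        have e2 : (d + 2) % 4 = 2 := by omega
        have d0R : dirR d = 0 := by rw [dirR_val, hd]; norm_num
        have d0C : dirC d = 1 := by rw [dirC_val, hd]; norm_num
        have d1R : dirR (d + 1) = 1 := by rw [dirR_val, e1]; norm_num
        have d1C : dirC (d + 1) = 0 := by rw [dirC_val, e1]; norm_num
        have d2R : dirR (d + 2) = 0 := by rw [dirR_val, e2]; norm_num
        have d2C : dirC (d + 2) = -1 := by rw [dirC_val, e2]; norm_num
        -- LHS: split the remaining four values into three straight runs
        rw [show n ^ 2 + 1 = v0 + 4 by omega,
            PySem.List.pyRange_one_append v0 (v0 + 2) (v0 + 4) (by omega) (by omega),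
            PySem.List.pyRange_one_append (v0 + 2) (v0 + 3) (v0 + 4) (by omega) (by omega),
            List.foldl_append, List.foldl_append]
        have r1 := runA' n v0 (v0 + 2) (by omega) g l l d
          (by intro k hk; rw [d0R, d0C]; unfold turnP; omega)
          (by rw [d0R, d0C]; unfold turnP; omega)
        rw [d0R, d0C, d1R, d1C, show ((v0 + 2) - v0).toNat = 2 by omega] at r1
        norm_num at r1
        rw [r1]
        have r2 := runA' n (v0 + 2) (v0 + 3) (by omega)
          (applyWrites g (segW l l 0 1 v0 2)) (l + 1) (l + 1) (d + 1)
          (by intro k hk; exact absurd hk (by omega))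
          (by rw [d1R, d1C]; unfold turnP; omega)
        rw [d1R, d1C, show d + 1 + 1 = d + 2 by ring, d2R, d2C,
            show ((v0 + 3) - (v0 + 2)).toNat = 1 by omega] at r2
        norm_num at r2
        rw [r2]
        have e3 : (d + 3) % 4 = 3 := by omega
        have d3R : dirR (d + 3) = -1 := by rw [dirR_val, e3]; norm_num
        have d3C : dirC (d + 3) = 0 := by rw [dirC_val, e3]; norm_num
        have r3 := runA' n (v0 + 3) (v0 + 4) (by omega)
          (applyWrites (applyWrites g (segW l l 0 1 v0 2)) (segW (l + 1) (l + 1) 1 0 (v0 + 2) 1))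
          (l + 1) l (d + 2)
          (by intro k hk; exact absurd hk (by omega))
          (by rw [d2R, d2C]; unfold turnP; omega)
        rw [d2R, d2C, show d + 2 + 1 = d + 3 by ring, d3R, d3C,
            show ((v0 + 4) - (v0 + 3)).toNat = 1 by omega] at r3
        norm_num at r3
        rw [r3]
        -- RHS: one pass of the bounds loop, then the guard fails
        have hb : n - 1 - l = l + 1 := by omega
        rw [hb]
        simp only [spiralLoop]
        rw [if_pos ⟨by omega, by omega⟩]
        rw [if_pos (show (l : Int) < l + 1 by omega), if_pos (show (l : Int) < l + 1 by omega)]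
        rw [foldBRow, foldBCol, foldBRow, foldBCol]
        rw [wRowF' l l (l + 1 + 1) v0 (by omega), wColF' (l + 1) (l + 1) (l + 1 + 1) _ (by omega),
            wRowB' (l + 1) (l + 1 - 1) (l - 1) _ (by omega), wColB' l (l + 1 - 1) l _ (by omega)]
        simp only [PySem.List.length_pyRange_one, PySem.List.length_pyRange_neg_one]
        rw [show ((l : Int) + 1 + 1 - l).toNat = 2 by omega,
            show ((l : Int) + 1 + 1 - (l + 1)).toNat = 1 by omega,
            show ((l : Int) + 1 - 1 - (l - 1)).toNat = 1 by omega,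
            show ((l : Int) + 1 - 1 - l).toNat = 0 by omega]
        norm_num
        cases f with
        | zero => simp [spiralLoop, applyWrites, segW]; rw [show v0 + 2 + 1 = v0 + 3 by ring]
        | succ f' =>
            simp only [spiralLoop]
            rw [if_neg (by omega)]
            simp [applyWrites, segW]
            rw [show v0 + 2 + 1 = v0 + 3 by ring]
      · -- general ring: four straight runs, then recurse on the inner square
        have hS3 : 3 ≤ n - 2 * l := by omega
        obtain ⟨f, rfl⟩ : ∃ f, fuel = f + 1 := ⟨fuel - 1, by omega⟩
        set S := n - 1 - 2 * l with hSdef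
        obtain ⟨sN, hsN⟩ : ∃ sN : Nat, (sN : Int) = S := ⟨S.toNat, by omega⟩
        have hS2 : 2 ≤ S := by omega
        have hsq1 : v0 + 4 * S = n ^ 2 - (S - 1) ^ 2 + 1 := by rw [hSdef, hv]; ring
        have hsq2 : 0 ≤ (S - 1 : Int) ^ 2 := sq_nonneg _
        have e1 : (d + 1) % 4 = 1 := by omega
        have e2 : (d + 2) % 4 = 2 := by omega
        have e3 : (d + 3) % 4 = 3 := by omega
        have e4 : (d + 4) % 4 = 0 := by omega
        have d0R : dirR d = 0 := by rw [dirR_val, hd]; norm_num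
        have d0C : dirC d = 1 := by rw [dirC_val, hd]; norm_num
        have d1R : dirR (d + 1) = 1 := by rw [dirR_val, e1]; norm_num
        have d1C : dirC (d + 1) = 0 := by rw [dirC_val, e1]; norm_num
        have d2R : dirR (d + 2) = 0 := by rw [dirR_val, e2]; norm_num
        have d2C : dirC (d + 2) = -1 := by rw [dirC_val, e2]; norm_num
        have d3R : dirR (d + 3) = -1 := by rw [dirR_val, e3]; norm_num
        have d3C : dirC (d + 3) = 0 := by rw [dirC_val, e3]; norm_num
        have d4R : dirR (d + 4) = 0 := by rw [dirR_val, e4]; norm_num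
        have d4C : dirC (d + 4) = 1 := by rw [dirC_val, e4]; norm_num
        -- LHS: split the ring's 4S values into four straight runs, keep the rest for the recursion
        rw [PySem.List.pyRange_one_append v0 (v0 + S + 1) (n ^ 2 + 1) (by omega) (by omega),
            PySem.List.pyRange_one_append (v0 + S + 1) (v0 + 2 * S + 1) (n ^ 2 + 1) (by omega) (by omega),
            PySem.List.pyRange_one_append (v0 + 2 * S + 1) (v0 + 3 * S + 1) (n ^ 2 + 1) (by omega) (by omega),
            PySem.List.pyRange_one_append (v0 + 3 * S + 1) (v0 + 4 * S) (n ^ 2 + 1) (by omega) (by omega),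
            List.foldl_append, List.foldl_append, List.foldl_append, List.foldl_append]
        have r1 := runA' n v0 (v0 + S + 1) (by omega) g l l d
          (by intro k hk; rw [d0R, d0C]; unfold turnP; omega)
          (by rw [d0R, d0C]; unfold turnP; omega)
        rw [d0R, d0C, d1R, d1C, show (v0 + S + 1 - v0).toNat = sN + 1 by omega,
            Nat.add_sub_cancel, hsN] at r1
        norm_num at r1
        rw [r1]
        have r2 := runA' n (v0 + S + 1) (v0 + 2 * S + 1) (by omega)
          (applyWrites g (segW l l 0 1 v0 (sN + 1))) (l + 1) (l + S) (d + 1)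
          (by intro k hk; rw [d1R, d1C]; unfold turnP; omega)
          (by rw [d1R, d1C]; unfold turnP; omega)
        rw [d1R, d1C, show d + 1 + 1 = d + 2 by ring, d2R, d2C,
            show (v0 + 2 * S + 1 - (v0 + S + 1)).toNat = sN by omega,
            show ((sN - 1 : Nat) : Int) = S - 1 by omega] at r2
        norm_num at r2
        rw [show l + S + -1 = l + S - 1 by ring] at r2
        rw [r2]
        have r3 := runA' n (v0 + 2 * S + 1) (v0 + 3 * S + 1) (by omega)
          (applyWrites (applyWrites g (segW l l 0 1 v0 (sN + 1)))
            (segW (l + 1) (l + S) 1 0 (v0 + S + 1) sN)) (l + S) (l + S - 1) (d + 2)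
          (by intro k hk; rw [d2R, d2C]; unfold turnP; omega)
          (by rw [d2R, d2C]; unfold turnP; omega)
        rw [d2R, d2C, show d + 2 + 1 = d + 3 by ring, d3R, d3C,
            show (v0 + 3 * S + 1 - (v0 + 2 * S + 1)).toNat = sN by omega,
            show ((sN - 1 : Nat) : Int) = S - 1 by omega] at r3
        norm_num at r3
        rw [show l + S + -1 = l + S - 1 by ring] at r3
        rw [r3]
        have r4 := runA' n (v0 + 3 * S + 1) (v0 + 4 * S) (by omega)
          (applyWrites (applyWrites (applyWrites g (segW l l 0 1 v0 (sN + 1)))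
            (segW (l + 1) (l + S) 1 0 (v0 + S + 1) sN))
            (segW (l + S) (l + S - 1) 0 (-1) (v0 + 2 * S + 1) sN)) (l + S - 1) l (d + 3)
          (by intro k hk; rw [d3R, d3C]; unfold turnP; omega)
          (by rw [d3R, d3C]; unfold turnP; omega)
        rw [d3R, d3C, show d + 3 + 1 = d + 4 by ring, d4R, d4C,
            show (v0 + 4 * S - (v0 + 3 * S + 1)).toNat = sN - 1 by omega,
            show ((sN - 1 - 1 : Nat) : Int) = S - 2 by omega] at r4
        norm_num at r4
        rw [show l + S - 1 + (2 - S) = l + 1 by ring] at r4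
        rw [r4]
        -- RHS: one pass of the bounds loop
        rw [show n - 1 - l = l + S by omega]
        simp only [spiralLoop]
        rw [if_pos ⟨by omega, by omega⟩, if_pos (show l < l + S by omega),
            if_pos (show l < l + S by omega)]
        rw [foldBRow, foldBCol, foldBRow, foldBCol]
        rw [wRowF' l l (l + S + 1) v0 (by omega), wColF' (l + S) (l + 1) (l + S + 1) _ (by omega),
            wRowB' (l + S) (l + S - 1) (l - 1) _ (by omega), wColB' l (l + S - 1) l _ (by omega)]
        simp only [PySem.List.length_pyRange_one, PySem.List.length_pyRange_neg_one]
        rw [show (l + S + 1 - l).toNat = sN + 1 by omega,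
            show (l + S + 1 - (l + 1)).toNat = sN by omega,
            show (l + S - 1 - (l - 1)).toNat = sN by omega,
            show (l + S - 1 - l).toNat = sN - 1 by omega,
            show ((sN + 1 : Nat) : Int) = S + 1 by omega, hsN,
            show ((sN - 1 : Nat) : Int) = S - 1 by omega]
        rw [show v0 + (S + 1) = v0 + S + 1 by ring, show v0 + S + 1 + S = v0 + 2 * S + 1 by ring,
            show v0 + 2 * S + 1 + S = v0 + 3 * S + 1 by ring,
            show v0 + 3 * S + 1 + (S - 1) = v0 + 4 * S by ring]
        rw [show l + S - 1 = n - 1 - (l + 1) by omega]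
        exact ih (n - 2 * (l + 1)).toNat (by omega) f (l + 1) (d + 4) (v0 + 4 * S) _
          (by omega) (by omega) rfl (by omega) (by omega)
          (by rw [show n - 2 * (l + 1) = S - 1 by omega]; omega)

-- ===== VERDICT (by name: the statement is the Claim_ definition above) =====
theorem rotaing_mat_spec : Claim_equal_rotaing_mat := by
  intro n _ hn
  unfold Pre_rotaing_mat at hn
  unfold Spec_rotaing_mat rotaing_mat rotaing_mat_alt
  apply congrArg fmtMat
  have hg : (PySem.List.pyRange 0 n 1).map
        (fun _ => (PySem.List.pyRange 0 n 1).map (fun _ => (0 : Int))) =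
      (PySem.List.pyRange 0 n 1).map (fun _ => PySem.List.pyRepeat [(0 : Int)] n) := by
    simp only [List.map_const', PySem.List.length_pyRange_one, PySem.List.pyRepeat_singleton]
    rw [show ((n : Int) - 0).toNat = n.toNat by omega]
  rw [hg]
  have h := masterGen n hn n.toNat (n - 1 + 1 - 0).toNat 0 0 1
      ((PySem.List.pyRange 0 n 1).map (fun _ => PySem.List.pyRepeat [(0 : Int)] n))
      le_rfl (by omega) (by omega) (by omega) (by norm_num) (by ring)
  rw [show n - 1 - 0 = n - 1 by ring] at h
  exact h
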